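-- pv_equiv track=rewrite | github.com/priyakdey/leetcode-solutions | 1318.py | minFlips
-- ===== SOURCE A (Python) =====
-- def minFlips(a: int, b: int, c: int) -> int:
--     min_flips = 0
--
--     for i in range(32):
--         aBit, bBit, cBit = a & 1, b & 1, c & 1
--         if cBit == 1:
--             if aBit == 0 and bBit == 0:
--                 min_flips += 1
--         else:
--             if aBit == 1:
--                 min_flips += 1
--             if bBit == 1:
--                 min_flips += 1
--
--         a = a >> 1
--         b = b >> 1
--         c = c >> 1
--
--     return min_flips
-- ===== SOURCE B (Python) =====
-- def minFlips(a: int, b: int, c: int) -> int: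
--     mask = 0xFFFFFFFF
--     aa, bb, cc = a & mask, b & mask, c & mask
--     return (
--         (cc & ((aa | bb) ^ mask)).bit_count()
--         + (aa & (cc ^ mask)).bit_count()
--         + (bb & (cc ^ mask)).bit_count()
--     )
-- ===== Notes on version B (the rewrite author's own statement) =====
-- stated objective: faster
-- what changed: Replaced the 32-iteration per-bit loop by a loop-free formula: mask a, b, c to 32 bits and sum three population counts (bits where c=1 but a|b=0, set bits of a where c=0, set bits of b where c=0) computed with parallel bitwise operations and int.bit_count.
import Mathlib
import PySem

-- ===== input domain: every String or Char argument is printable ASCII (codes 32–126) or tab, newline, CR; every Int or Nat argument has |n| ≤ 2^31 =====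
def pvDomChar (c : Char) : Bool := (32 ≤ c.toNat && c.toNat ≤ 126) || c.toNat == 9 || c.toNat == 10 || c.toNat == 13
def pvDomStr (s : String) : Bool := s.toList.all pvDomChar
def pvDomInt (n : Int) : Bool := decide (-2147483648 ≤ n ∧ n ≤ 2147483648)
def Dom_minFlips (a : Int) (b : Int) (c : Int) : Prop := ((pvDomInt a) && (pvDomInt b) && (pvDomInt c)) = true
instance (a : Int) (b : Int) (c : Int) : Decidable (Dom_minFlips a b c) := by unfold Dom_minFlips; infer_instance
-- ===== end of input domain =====

-- B replaces A's 32-iteration per-bit loop by a loop-free sum of three 32-bit population counts (objective: faster by a constant factor; per-call times were below a timing run's resolution).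

-- ===== PORT A =====
-- the body of A's `for i in range(32)` loop (the state is (a, b, c, min_flips))
def pvStep (s : Int × Int × Int × Int) (_ : Int) : Int × Int × Int × Int :=
  let a := s.1; let b := s.2.1; let c := s.2.2.1; let m := s.2.2.2
  let aBit := PySem.Int.band a 1
  let bBit := PySem.Int.band b 1
  let cBit := PySem.Int.band c 1
  let m' :=
    if cBit = 1 then
      if aBit = 0 ∧ bBit = 0 then m + 1 else m
    else
      let m1 := if aBit = 1 then m + 1 else m
      if bBit = 1 then m1 + 1 else m1
  (a >>> (1 : Nat), b >>> (1 : Nat), c >>> (1 : Nat), m')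

def minFlips (a : Int) (b : Int) (c : Int) : Int :=
  ((PySem.List.pyRange 0 32).foldl pvStep (a, b, c, 0)).2.2.2

-- ===== PORT B =====
def minFlips_alt (a : Int) (b : Int) (c : Int) : Int :=
  let mask : Int := 4294967295
  let aa := PySem.Int.band a mask
  let bb := PySem.Int.band b mask
  let cc := PySem.Int.band c mask
  ((PySem.Int.bitCount (PySem.Int.band cc (PySem.Int.bxor (PySem.Int.bor aa bb) mask))
    + PySem.Int.bitCount (PySem.Int.band aa (PySem.Int.bxor cc mask))
    + PySem.Int.bitCount (PySem.Int.band bb (PySem.Int.bxor cc mask)) : Nat) : Int)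

-- ===== PRECONDITION & SPEC =====
def Spec_minFlips (a : Int) (b : Int) (c : Int) (out : Int) : Prop := out = minFlips_alt a b c
instance (a : Int) (b : Int) (c : Int) (out : Int) : Decidable (Spec_minFlips a b c out) := by unfold Spec_minFlips; infer_instance

-- ===== CLAIM (what is proved, stated in full; the proofs are below) =====
def Claim_equal_minFlips : Prop := ∀ (a : Int) (b : Int) (c : Int), Dom_minFlips a b c → Spec_minFlips a b c (minFlips a b c)

-- ===== LEMMAS AND PROOFS =====

-- what one iteration of A's loop adds to the counter
def pvContrib (a b c : Int) : Int :=
  if PySem.Int.band c 1 = 1 then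
    if PySem.Int.band a 1 = 0 ∧ PySem.Int.band b 1 = 0 then 1 else 0
  else
    (if PySem.Int.band a 1 = 1 then 1 else 0) + (if PySem.Int.band b 1 = 1 then 1 else 0)

theorem pvStep_eq (a b c m : Int) (x : Int) :
    pvStep (a, b, c, m) x =
      (a >>> (1 : Nat), b >>> (1 : Nat), c >>> (1 : Nat), m + pvContrib a b c) := by
  simp only [pvStep, pvContrib]
  split_ifs <;> simp <;> ring

-- bit i of the low 32 bits of a (the two's-complement window Python's loop reads)
def pvBit (a : Int) (i : Nat) : Bool := ((a % 2 ^ 32).toNat).testBit i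

theorem pvShift_shift (a : Int) (n : Nat) : (a >>> n) >>> (1 : Nat) = a >>> (n + 1) := by
  simp only [Int.shiftRight_eq_div_pow]
  rw [Int.ediv_ediv_eq_ediv_mul (by positivity)]
  norm_num [pow_succ]

-- the loop, fully characterised
theorem pvLoop (n : Nat) (a b c m : Int) :
    (PySem.List.pyRange 0 (n : Int)).foldl pvStep (a, b, c, m) =
      (a >>> n, b >>> n, c >>> n,
        m + ∑ i ∈ Finset.range n, pvContrib (a >>> i) (b >>> i) (c >>> i)) := by
  induction n with
  | zero => simp [PySem.List.pyRange_one_eq_nil (le_refl 0)]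
  | succ n ih =>
      have hcast : ((n + 1 : Nat) : Int) = (n : Int) + 1 := by push_cast; ring
      rw [hcast, PySem.List.pyRange_one_succ_right (by positivity), List.foldl_append, ih]
      simp only [List.foldl_cons, List.foldl_nil, pvStep_eq, pvShift_shift,
        Finset.sum_range_succ, add_assoc]

-- key arithmetic: for i < 32 the i-th bit of a equals the i-th bit of a mod 2^32
theorem pvMod_div_emod (a : Int) (i : Nat) (h : i < 32) :
    (a / 2 ^ i) % 2 = ((a % 2 ^ 32) / 2 ^ i) % 2 := by
  have h32 : (2 : Int) ^ 32 = (2 ^ (31 - i) * 2) * 2 ^ i := by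
    rw [mul_assoc, mul_comm (2 : Int) (2 ^ i), ← pow_succ, ← pow_add]
    congr 1; omega
  have hq : a = a % 2 ^ 32 + (2 ^ (31 - i) * 2 * (a / 2 ^ 32)) * 2 ^ i := by
    calc a = a % 2 ^ 32 + 2 ^ 32 * (a / 2 ^ 32) := by
              rw [show ((2:Int) ^ 32) = 4294967296 by norm_num]; omega
    _ = a % 2 ^ 32 + (2 ^ (31 - i) * 2 * (a / 2 ^ 32)) * 2 ^ i := by rw [h32]; ring
  conv_lhs => rw [hq]
  rw [Int.add_mul_ediv_right _ _ (by positivity : (0:Int) < 2 ^ i).ne',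
    show (2:Int) ^ (31 - i) * 2 * (a / 2 ^ 32) = 2 ^ (31 - i) * (a / 2 ^ 32) * 2 from by ring]
  generalize a % 2 ^ 32 / 2 ^ i = x
  generalize (2:Int) ^ (31 - i) * (a / 2 ^ 32) = y
  omega

-- the low bit of a shifted value is a test bit of the 32-bit window
theorem pvBand_one_shift (a : Int) (i : Nat) (h : i < 32) :
    PySem.Int.band (a >>> i) 1 = if pvBit a i then 1 else 0 := by
  have hN : (0 : Int) ≤ a % 2 ^ 32 := Int.emod_nonneg a (by positivity)
  have hNcast : a % 2 ^ 32 = (((a % 2 ^ 32).toNat : Nat) : Int) :=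
    (Int.toNat_of_nonneg hN).symm
  rw [PySem.Int.band_one, PySem.Int.mod_eq_emod_of_pos (by norm_num),
    Int.shiftRight_eq_div_pow]
  have hpow : ((2 ^ i : Nat) : Int) = 2 ^ i := by push_cast; ring
  rw [hpow, pvMod_div_emod a i h, hNcast]
  have hcast : (((a % 2 ^ 32).toNat : Nat) : Int) / 2 ^ i % 2 =
      (((a % 2 ^ 32).toNat / 2 ^ i % 2 : Nat) : Int) := by push_cast; ring
  rw [hcast, pvBit, Nat.testBit_eq_decide_div_mod_eq]
  rcases Nat.mod_two_eq_zero_or_one ((a % 2 ^ 32).toNat / 2 ^ i) with hx | hx <;>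
    rw [hx] <;> norm_num

-- per-bit value of A's contribution
theorem pvContrib_bits (a b c : Int) (i : Nat) (h : i < 32) :
    pvContrib (a >>> i) (b >>> i) (c >>> i) =
      (((pvBit c i && !(pvBit a i || pvBit b i)).toNat
        + (pvBit a i && !pvBit c i).toNat
        + (pvBit b i && !pvBit c i).toNat : Nat) : Int) := by
  rw [pvContrib, pvBand_one_shift a i h, pvBand_one_shift b i h, pvBand_one_shift c i h]
  cases pvBit a i <;> cases pvBit b i <;> cases pvBit c i <;> norm_num

-- bitCount of a Nat below 2^k is the sum of its first k bits
theorem pvPop (k : Nat) (m : Nat) (h : m < 2 ^ k) :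
    PySem.Int.bitCount (m : Int) = ∑ i ∈ Finset.range k, (m.testBit i).toNat := by
  induction k generalizing m with
  | zero =>
      interval_cases m
      simpa using PySem.Int.bitCount_natCast_zero
  | succ k ih =>
      rcases Nat.eq_zero_or_pos m with rfl | hm
      · simp only [Nat.zero_testBit, Bool.toNat_false, Finset.sum_const_zero]
        simpa using PySem.Int.bitCount_natCast_zero
      · rw [PySem.Int.bitCount_natCast hm, ih (m / 2) (by rw [pow_succ] at h; omega),
          Finset.sum_range_succ']
        simp only [Nat.testBit_succ]
        have h0 : (m.testBit 0).toNat = m % 2 := by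
          rw [Nat.testBit_eq_decide_div_mod_eq]
          rcases Nat.mod_two_eq_zero_or_one m with hx | hx <;> simp [hx]
        omega

-- the mask: a & 0xFFFFFFFF is a mod 2^32
theorem pvBand_mask (a : Int) : PySem.Int.band a 4294967295 = a % 2 ^ 32 := by
  have hlit : Int.toNat 4294967295 = 2 ^ 32 - 1 := by rfl
  have hpow : (2 : Int) ^ 32 = 4294967296 := by norm_num
  have hpowN : (2 : Nat) ^ 32 = 4294967296 := by norm_num
  by_cases ha : 0 ≤ a
  · rw [PySem.Int.band_of_nonneg ha (by norm_num), hlit,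
      Nat.and_two_pow_sub_one_eq_mod, hpow, hpowN]
    omega
  · simp only [PySem.Int.band]
    rw [if_neg (by omega), if_pos (by norm_num), hlit, Nat.land_comm,
      Nat.and_two_pow_sub_one_eq_mod, hpow, hpowN]
    omega

-- per-bit reading of B's three masked words
theorem pvTest1 (na nb nc i : Nat) (h : i < 32) :
    (nc &&& ((na ||| nb) ^^^ 4294967295)).testBit i
      = (nc.testBit i && !(na.testBit i || nb.testBit i)) := by
  rw [Nat.testBit_land, Nat.testBit_xor, Nat.testBit_lor,
    show (4294967295 : Nat) = 2 ^ 32 - 1 from by norm_num,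
    Nat.testBit_two_pow_sub_one]
  simp [h]

theorem pvTest2 (na nc i : Nat) (h : i < 32) :
    (na &&& (nc ^^^ 4294967295)).testBit i = (na.testBit i && !nc.testBit i) := by
  rw [Nat.testBit_land, Nat.testBit_xor,
    show (4294967295 : Nat) = 2 ^ 32 - 1 from by norm_num,
    Nat.testBit_two_pow_sub_one]
  simp [h]

-- B's three popcounts, as bit sums over the 32-bit windows
theorem pvAlt_eq (a b c : Int) :
    minFlips_alt a b c =
      ((∑ i ∈ Finset.range 32, (pvBit c i && !(pvBit a i || pvBit b i)).toNat
        + ∑ i ∈ Finset.range 32, (pvBit a i && !pvBit c i).toNat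
        + ∑ i ∈ Finset.range 32, (pvBit b i && !pvBit c i).toNat : Nat) : Int) := by
  have hmask : (4294967295 : Int) = ((4294967295 : Nat) : Int) := by norm_num
  have hwin (x : Int) : PySem.Int.band x 4294967295 = (((x % 2 ^ 32).toNat : Nat) : Int) := by
    rw [pvBand_mask, Int.toNat_of_nonneg (Int.emod_nonneg x (by positivity))]
  have hlt (x : Int) : (x % 2 ^ 32).toNat < 2 ^ 32 := by
    have h1 : x % 2 ^ 32 < 2 ^ 32 := Int.emod_lt_of_pos x (by positivity)
    omega
  simp only [minFlips_alt, hwin]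
  simp only [hmask, PySem.Int.bor_natCast, PySem.Int.bxor_natCast, PySem.Int.band_natCast]
  refine congrArg (fun n : Nat => (n : Int)) ?_
  rw [pvPop 32 _ (Nat.lt_of_le_of_lt Nat.and_le_left (hlt c)),
    pvPop 32 _ (Nat.lt_of_le_of_lt Nat.and_le_left (hlt a)),
    pvPop 32 _ (Nat.lt_of_le_of_lt Nat.and_le_left (hlt b))]
  simp only [pvBit]
  generalize (a % 2 ^ 32).toNat = na
  generalize (b % 2 ^ 32).toNat = nb
  generalize (c % 2 ^ 32).toNat = nc
  rw [Finset.sum_congr rfl fun i hi =>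
      congrArg Bool.toNat (pvTest1 na nb nc i (Finset.mem_range.mp hi)),
    Finset.sum_congr rfl fun i hi =>
      congrArg Bool.toNat (pvTest2 na nc i (Finset.mem_range.mp hi)),
    Finset.sum_congr rfl fun i hi =>
      congrArg Bool.toNat (pvTest2 nb nc i (Finset.mem_range.mp hi))]

theorem minFlips_agree (a b c : Int) : minFlips a b c = minFlips_alt a b c := by
  have h32 : (32 : Int) = ((32 : Nat) : Int) := by norm_num
  rw [minFlips, h32, pvLoop, pvAlt_eq]
  simp only [zero_add]
  rw [Finset.sum_congr rfl fun i hi => pvContrib_bits a b c i (Finset.mem_range.mp hi)]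
  push_cast
  rw [Finset.sum_add_distrib, Finset.sum_add_distrib]

-- ===== VERDICT (by name: the statement is the Claim_ definition above) =====
theorem minFlips_spec : Claim_equal_minFlips := by
  intro a b c _
  unfold Spec_minFlips
  exact minFlips_agree a b c
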